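-- pv_equiv track=rewrite | github.com/zarbo-ian/SentimentAnalisis | funciones.py | calcular_puntaje_publicaciones
-- ===== SOURCE A (Python) =====
-- def calcular_puntaje_publicaciones(puntaje_com, id_comentario, id_publicacion):
--     puntaje_pub = {post: 0 for post in id_publicacion}
--
--     for i in range(len(puntaje_com)):
--         puntaje = puntaje_com[i]
--         coment = id_comentario[i]
--         if coment in puntaje_pub:
--             puntaje_pub[coment] += puntaje
--     puntaje_final = [puntaje_pub[post] for post in id_publicacion]
--     return puntaje_final
-- ===== SOURCE B (Python) =====
-- def calcular_puntaje_publicaciones(puntaje_com, id_comentario, id_publicacion):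
--     return [sum(puntaje_com[i] for i in range(len(puntaje_com))
--                 if id_comentario[i] == post)
--             for post in id_publicacion]
-- ===== Notes on version B (the rewrite author's own statement) =====
-- stated objective: simpler
-- what changed: Replaces the dict accumulator (build index of zeros, one indexed pass updating it, then a lookup pass) with a direct nested comprehension that re-scans the comments and sums matches per publication; no dict is maintained.
import Mathlib
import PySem

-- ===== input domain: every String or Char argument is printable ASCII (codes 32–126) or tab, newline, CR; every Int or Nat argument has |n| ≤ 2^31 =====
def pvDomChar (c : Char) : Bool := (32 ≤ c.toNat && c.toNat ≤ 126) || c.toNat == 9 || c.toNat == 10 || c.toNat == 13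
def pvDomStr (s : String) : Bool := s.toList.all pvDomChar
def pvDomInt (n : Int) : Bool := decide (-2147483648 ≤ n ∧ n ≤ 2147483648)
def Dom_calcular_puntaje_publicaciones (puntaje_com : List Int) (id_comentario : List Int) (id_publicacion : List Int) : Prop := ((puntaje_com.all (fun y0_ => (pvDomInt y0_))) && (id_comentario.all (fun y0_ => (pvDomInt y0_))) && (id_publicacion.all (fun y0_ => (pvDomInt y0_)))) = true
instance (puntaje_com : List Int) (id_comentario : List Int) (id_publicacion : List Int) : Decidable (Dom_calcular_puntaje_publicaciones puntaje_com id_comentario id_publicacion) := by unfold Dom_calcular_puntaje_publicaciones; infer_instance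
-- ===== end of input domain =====

-- B replaces A's dict accumulator with a direct nested scan summing matching comment
-- scores per publication (simpler: no index is built or maintained).

-- ===== PORT A =====
def calcular_puntaje_publicaciones (puntaje_com : List Int) (id_comentario : List Int) (id_publicacion : List Int) : List Int :=
  -- puntaje_pub = {post: 0 for post in id_publicacion}
  let d0 : PySem.Dict Int Int :=
    id_publicacion.foldl (fun d post => d.insert post 0) PySem.Dict.empty
  -- for i in range(len(puntaje_com)): … (indexing is total here via pyGetD's default;
  -- Pre_ excludes the inputs where Python's id_comentario[i] raises IndexError)
  let d1 :=
    (PySem.List.pyRange 0 (puntaje_com.length : Int) 1).foldl (fun d i =>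
      if ((d.get? (PySem.List.pyGetD id_comentario i 0)).isSome) then
        d.modify (PySem.List.pyGetD id_comentario i 0) 0
          (fun v => v + PySem.List.pyGetD puntaje_com i 0)
      else d) d0
  -- [puntaje_pub[post] for post in id_publicacion]  (every post is a key, so getD is exact)
  id_publicacion.map (fun post => d1.getD post 0)

-- ===== PORT B =====
def calcular_puntaje_publicaciones_alt (puntaje_com : List Int) (id_comentario : List Int) (id_publicacion : List Int) : List Int :=
  id_publicacion.map (fun post =>
    (PySem.List.pyRange 0 (puntaje_com.length : Int) 1).foldl (fun acc i =>
      if PySem.List.pyGetD id_comentario i 0 = post then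
        acc + PySem.List.pyGetD puntaje_com i 0
      else acc) 0)

-- ===== PRECONDITION & SPEC =====
-- Python A indexes id_comentario[i] for every i < len(puntaje_com): it raises IndexError
-- exactly when id_comentario is shorter than puntaje_com; Pre_ excludes those inputs.
def Pre_calcular_puntaje_publicaciones (puntaje_com : List Int) (id_comentario : List Int) (id_publicacion : List Int) : Prop :=
  puntaje_com.length ≤ id_comentario.length
instance (puntaje_com : List Int) (id_comentario : List Int) (id_publicacion : List Int) : Decidable (Pre_calcular_puntaje_publicaciones puntaje_com id_comentario id_publicacion) := by unfold Pre_calcular_puntaje_publicaciones; infer_instance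
def pvWitness_calcular_puntaje_publicaciones : List Int × List Int × List Int := ([1, 2, 5], [7, 9, 7], [7, 9, 7])

def Spec_calcular_puntaje_publicaciones (puntaje_com : List Int) (id_comentario : List Int) (id_publicacion : List Int) (out : List Int) : Prop := out = calcular_puntaje_publicaciones_alt puntaje_com id_comentario id_publicacion
instance (puntaje_com : List Int) (id_comentario : List Int) (id_publicacion : List Int) (out : List Int) : Decidable (Spec_calcular_puntaje_publicaciones puntaje_com id_comentario id_publicacion out) := by unfold Spec_calcular_puntaje_publicaciones; infer_instance

-- ===== CLAIM (what is proved, stated in full; the proofs are below) =====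
def Claim_equal_calcular_puntaje_publicaciones : Prop := ∀ (puntaje_com : List Int) (id_comentario : List Int) (id_publicacion : List Int), Dom_calcular_puntaje_publicaciones puntaje_com id_comentario id_publicacion → Pre_calcular_puntaje_publicaciones puntaje_com id_comentario id_publicacion → Spec_calcular_puntaje_publicaciones puntaje_com id_comentario id_publicacion (calcular_puntaje_publicaciones puntaje_com id_comentario id_publicacion)


-- ===== LEMMAS AND PROOFS =====

-- A's comment loop never changes which keys the dict contains (it only modifies keys
-- that are already present).
lemma pv_contains_fold (pc ic : List Int) (n : Nat) (d0 : PySem.Dict Int Int) (x : Int) :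
    ((PySem.List.pyRange 0 (n : Int) 1).foldl (fun d i =>
      if ((d.get? (PySem.List.pyGetD ic i 0)).isSome) then
        d.modify (PySem.List.pyGetD ic i 0) 0
          (fun v => v + PySem.List.pyGetD pc i 0)
      else d) d0).contains x = d0.contains x := by
  induction n with
  | zero => simp
  | succ n ih =>
    rw [show ((((n : Nat) + 1 : Nat)) : Int) = (n : Int) + 1 by push_cast; ring,
        PySem.List.pyRange_one_succ_right (by positivity), List.foldl_append]
    simp only [List.foldl]
    set D := ((PySem.List.pyRange 0 (n : Int) 1).foldl (fun d i =>
      if ((d.get? (PySem.List.pyGetD ic i 0)).isSome) then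
        d.modify (PySem.List.pyGetD ic i 0) 0
          (fun v => v + PySem.List.pyGetD pc i 0)
      else d) d0) with hD
    by_cases h : ((D.get? (PySem.List.pyGetD ic (n : Int) 0)).isSome)
    · rw [if_pos h, PySem.Dict.contains_modify]
      by_cases hx : x = PySem.List.pyGetD ic (n : Int) 0
      · subst hx
        have hct : D.contains (PySem.List.pyGetD ic (n : Int) 0) = true := by
          rw [PySem.Dict.contains_eq_isSome_get?]; exact h
        rw [← ih, hct]
        simp
      · have hb : (x == PySem.List.pyGetD ic (n : Int) 0) = false :=
          beq_eq_false_iff_ne.mpr hx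
        rw [hb, Bool.false_or]; exact ih
    · rw [if_neg h]; exact ih

-- The invariant of A's loop: for any key present in d0, its value after the first n
-- iterations is its initial value plus B's partial sum over those n comments.
lemma pv_getD_fold (pc ic : List Int) (n : Nat) (d0 : PySem.Dict Int Int) (post : Int)
    (h : d0.contains post = true) :
    ((PySem.List.pyRange 0 (n : Int) 1).foldl (fun d i =>
      if ((d.get? (PySem.List.pyGetD ic i 0)).isSome) then
        d.modify (PySem.List.pyGetD ic i 0) 0
          (fun v => v + PySem.List.pyGetD pc i 0)
      else d) d0).getD post 0
    = d0.getD post 0 + (PySem.List.pyRange 0 (n : Int) 1).foldl (fun acc i =>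
        if PySem.List.pyGetD ic i 0 = post then
          acc + PySem.List.pyGetD pc i 0
        else acc) 0 := by
  induction n with
  | zero => simp
  | succ n ih =>
    rw [show ((((n : Nat) + 1 : Nat)) : Int) = (n : Int) + 1 by push_cast; ring,
        PySem.List.pyRange_one_succ_right (by positivity), List.foldl_append,
        List.foldl_append]
    simp only [List.foldl]
    set D := ((PySem.List.pyRange 0 (n : Int) 1).foldl (fun d i =>
      if ((d.get? (PySem.List.pyGetD ic i 0)).isSome) then
        d.modify (PySem.List.pyGetD ic i 0) 0
          (fun v => v + PySem.List.pyGetD pc i 0)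
      else d) d0) with hD
    by_cases hc : ((D.get? (PySem.List.pyGetD ic (n : Int) 0)).isSome)
    · rw [if_pos hc, PySem.Dict.getD_modify]
      by_cases hx : post = PySem.List.pyGetD ic (n : Int) 0
      · rw [if_pos hx, if_pos hx.symm, ← hx, ih]
        ring
      · rw [if_neg hx, if_neg (fun he => hx he.symm), ih]
    · rw [if_neg hc]
      have hnp : PySem.List.pyGetD ic (n : Int) 0 ≠ post := by
        intro he
        have : D.contains post = true := by rw [hD, pv_contains_fold]; exact h
        rw [PySem.Dict.contains_eq_isSome_get?] at this
        exact hc (he ▸ this)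
      rw [if_neg hnp, ih]

-- The initial dict {post: 0 for post in l}: key set and values.
lemma pv_contains_init (l : List Int) (d : PySem.Dict Int Int) (x : Int) :
    (l.foldl (fun d post => d.insert post 0) d).contains x
      = (decide (x ∈ l) || d.contains x) := by
  induction l generalizing d with
  | nil => simp
  | cons k l ih =>
    simp only [List.foldl, ih, PySem.Dict.contains_insert, List.mem_cons]
    by_cases hx : x = k <;> by_cases hl : x ∈ l <;> simp [hx, hl]

lemma pv_getD_init (l : List Int) (d : PySem.Dict Int Int) (x : Int) :
    (l.foldl (fun d post => d.insert post 0) d).getD x 0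
      = if x ∈ l then 0 else d.getD x 0 := by
  induction l generalizing d with
  | nil => simp
  | cons k l ih =>
    simp only [List.foldl, ih, List.mem_cons]
    by_cases hl : x ∈ l
    · simp [hl]
    · by_cases hx : x = k <;>
        simp [hl, hx, PySem.Dict.getD_insert]

-- ===== VERDICT (by name: the statement is the Claim_ definition above) =====
theorem calcular_puntaje_publicaciones_spec : Claim_equal_calcular_puntaje_publicaciones := by
  intro pc ic ip _ _
  unfold Spec_calcular_puntaje_publicaciones calcular_puntaje_publicaciones
    calcular_puntaje_publicaciones_alt
  simp only []
  apply List.map_congr_left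
  intro post hpost
  rw [pv_getD_fold]
  · rw [pv_getD_init]
    simp [hpost]
  · rw [pv_contains_init]
    simp [hpost]
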